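-- pv_equiv track=rewrite | github.com/markus-bcit/term1 | ACIT1515/Week8/dict_sorting.py | generate_age_freq_dict
-- ===== SOURCE A (Python) =====
-- def generate_age_freq_dict(age_counts: dict[int, int]) -> dict[int, list[int]]:
--     """Transform a dictionary swapping,  the key with the value.
--     In this case a dictionary indexed by age with a value of the total number of people
--     of that age, is transformed into a dictionary indexed the total number of people
--     with the age, with a value of a list of ages that occur with that frequency.
--
--     Args:
--         age_counts (dict[int, int]): a dictionary with ages and the number of
--                                      people with that age
--
--     Returns:
--         dict[int, list[int]]: the key is the number of people with that age and
--                               the value is a list of ages with that frequency.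
--     """
--
--     freq_age_dict: dict[int, int] = {}
--
--     for age, freq in age_counts.items():
--         if freq in freq_age_dict:
--             freq_age_dict[freq].append(age)
--         else:
--             freq_age_dict[freq] = [age]
--
--     return freq_age_dict
-- ===== SOURCE B (Python) =====
-- def generate_age_freq_dict(age_counts: dict[int, int]) -> dict[int, list[int]]:
--     """Invert age->frequency into frequency->list-of-ages, two-pass:
--     collect the distinct frequencies in first-occurrence order, then build
--     each group with one filtering pass per frequency."""
--     freqs = list(dict.fromkeys(age_counts.values()))
--     return {f: [age for age, c in age_counts.items() if c == f] for f in freqs}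
-- ===== Notes on version B (the rewrite author's own statement) =====
-- stated objective: alternative
-- what changed: A builds the inverted mapping in one pass with a dict-of-lists accumulator (append or create per item); B first deduplicates the frequencies in first-occurrence order, then builds each group with a separate filtering pass per distinct frequency.
import Mathlib
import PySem

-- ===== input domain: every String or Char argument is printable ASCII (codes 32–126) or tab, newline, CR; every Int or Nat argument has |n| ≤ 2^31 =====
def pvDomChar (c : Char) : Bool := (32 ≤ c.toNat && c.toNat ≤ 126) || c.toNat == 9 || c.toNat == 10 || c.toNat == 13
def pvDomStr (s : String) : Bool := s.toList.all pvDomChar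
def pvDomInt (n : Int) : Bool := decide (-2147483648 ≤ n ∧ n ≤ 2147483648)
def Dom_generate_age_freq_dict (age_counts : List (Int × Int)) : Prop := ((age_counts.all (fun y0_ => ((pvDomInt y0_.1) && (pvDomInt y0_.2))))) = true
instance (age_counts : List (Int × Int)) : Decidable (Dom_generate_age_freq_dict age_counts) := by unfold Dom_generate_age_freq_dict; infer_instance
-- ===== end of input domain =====

-- B replaces A's single-pass dict-of-lists accumulation with a two-pass build (dedup the
-- frequencies, then one filtering pass per distinct frequency); objective: alternative, not faster.

-- ===== PORT A =====
-- one dict-of-lists accumulator, one pass: append to the list if the freq key exists, else create it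
def generate_age_freq_dict (age_counts : List (Int × Int)) : List (Int × List Int) :=
  (age_counts.foldl
    (fun d p =>
      if d.contains p.2 then d.modify p.2 [] (fun l => l ++ [p.1])
      else d.insert p.2 [p.1])
    PySem.Dict.empty).items

-- ===== PORT B =====
-- distinct frequencies in first-occurrence order, then a filtering pass per frequency
def generate_age_freq_dict_alt (age_counts : List (Int × Int)) : List (Int × List Int) :=
  (PySem.List.dedup (age_counts.map (fun p => p.2))).map
    (fun f => (f, (age_counts.filter (fun p => p.2 == f)).map (fun p => p.1)))

-- ===== PRECONDITION & SPEC =====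
def Spec_generate_age_freq_dict (age_counts : List (Int × Int)) (out : List (Int × List Int)) : Prop := out = generate_age_freq_dict_alt age_counts
instance (age_counts : List (Int × Int)) (out : List (Int × List Int)) : Decidable (Spec_generate_age_freq_dict age_counts out) := by unfold Spec_generate_age_freq_dict; infer_instance

-- ===== CLAIM (what is proved, stated in full; the proofs are below) =====
def Claim_equal_generate_age_freq_dict : Prop := ∀ (age_counts : List (Int × Int)), Dom_generate_age_freq_dict age_counts → Spec_generate_age_freq_dict age_counts (generate_age_freq_dict age_counts)

-- ===== LEMMAS AND PROOFS =====

-- A's if/else step is exactly a `modify` with default []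
theorem gafd_step_eq :
    (fun (d : PySem.Dict Int (List Int)) (p : Int × Int) =>
      if d.contains p.2 then d.modify p.2 [] (fun l => l ++ [p.1])
      else d.insert p.2 [p.1])
    = fun d p => d.modify p.2 [] (fun l => l ++ [p.1]) := by
  funext d p
  by_cases h : d.contains p.2
  · simp [h]
  · simp only [Bool.not_eq_true] at h
    simp [h, PySem.Dict.modify, PySem.Dict.getD_of_not_contains _ _ h]

-- the accumulation loop, rewritten over the swapped pair list
theorem gafd_loop_swap (age_counts : List (Int × Int)) :
    age_counts.foldl (fun d p => d.modify p.2 [] (fun l => l ++ [p.1])) PySem.Dict.empty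
    = (age_counts.map (fun p => (p.2, p.1))).foldl
        (fun d q => d.modify q.1 [] (fun l => l ++ [q.2])) PySem.Dict.empty := by
  rw [List.foldl_map]

theorem generate_age_freq_dict_spec : Claim_equal_generate_age_freq_dict := by
  intro age_counts _
  unfold Spec_generate_age_freq_dict generate_age_freq_dict generate_age_freq_dict_alt
  rw [gafd_step_eq, gafd_loop_swap]
  set l' := age_counts.map (fun p => (p.2, p.1)) with hl'
  set L := l'.foldl (fun d q => d.modify q.1 [] (fun l => l ++ [q.2])) PySem.Dict.empty with hL
  have hnodup : L.keys.Nodup := by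
    rw [hL]
    exact PySem.Dict.nodup_keys_foldl_modify_key l' (fun q => q.1) []
      (fun _ q => fun l => l ++ [q.2]) PySem.Dict.empty (by simp)
  have hkeys : L.keys = PySem.Set.ofList (age_counts.map (fun p => p.2)) := by
    rw [hL, PySem.Dict.keys_foldl_modify_key l' (fun q => q.1) []
      (fun _ q => fun l => l ++ [q.2]) PySem.Dict.empty]
    simp [hl', PySem.Set.update_nil_left, Function.comp_def]
  have hgetD : ∀ c : Int, L.getD c [] =
      (age_counts.filter (fun p => p.2 == c)).map (fun p => p.1) := by
    intro c
    rw [hL, PySem.Dict.getD_foldl_modify_append l' PySem.Dict.empty c]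
    simp [hl', List.filter_map, Function.comp_def]
  rw [PySem.Dict.items_eq_map_keys L hnodup [], hkeys, PySem.List.dedup_eq_ofList]
  exact List.map_congr_left (fun k _ => by rw [hgetD k])
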